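-- pv_equiv track=rewrite | github.com/agnes1234567/presentation_plotting | scripts/print_stats.py | calc_combination_count
-- ===== SOURCE A (Python) =====
-- def calc_combination_count(fullterm_key, p1, p2):
--     p1_key = fullterm_key[0]
--     p2_key = fullterm_key[-1]
--     p1_vals_to_combine = []
--     for key in p1:
--          if key != p1_key:
--             p1_vals_to_combine.append(p1[key])
--
--     p2_vals_to_combine = []
--     for key in p2:
--         if key != p2_key:
--             p2_vals_to_combine.append(p2[key])
--
--     return recursive_combination_prod(0, p1_vals_to_combine) * recursive_combination_prod(0, p2_vals_to_combine)
--
-- def recursive_combination_prod(res, lst):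
--     if(len(lst) == 0):
--         return res
--     else:
--         res += lst[0] * sum(lst[1:])
--         return recursive_combination_prod(res, lst[1:])
-- ===== SOURCE B (Python) =====
-- def calc_combination_count(fullterm_key, p1, p2):
--     return _half(p1, fullterm_key[0]) * _half(p2, fullterm_key[-1])
--
-- def _half(d, key):
--     acc = 0
--     s = 0
--     for k, v in d.items():
--         if k != key:
--             acc += s * v
--             s += v
--     return acc
-- ===== Notes on version B (the rewrite author's own statement) =====
-- stated objective: faster
-- what changed: Replaced the recursive pairwise sum-of-products (which re-slices and re-sums the tail at every step, O(n^2)) by a single pass keeping a running prefix sum (acc += prefix*v; prefix += v), fused with the filtering loop.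
import Mathlib
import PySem

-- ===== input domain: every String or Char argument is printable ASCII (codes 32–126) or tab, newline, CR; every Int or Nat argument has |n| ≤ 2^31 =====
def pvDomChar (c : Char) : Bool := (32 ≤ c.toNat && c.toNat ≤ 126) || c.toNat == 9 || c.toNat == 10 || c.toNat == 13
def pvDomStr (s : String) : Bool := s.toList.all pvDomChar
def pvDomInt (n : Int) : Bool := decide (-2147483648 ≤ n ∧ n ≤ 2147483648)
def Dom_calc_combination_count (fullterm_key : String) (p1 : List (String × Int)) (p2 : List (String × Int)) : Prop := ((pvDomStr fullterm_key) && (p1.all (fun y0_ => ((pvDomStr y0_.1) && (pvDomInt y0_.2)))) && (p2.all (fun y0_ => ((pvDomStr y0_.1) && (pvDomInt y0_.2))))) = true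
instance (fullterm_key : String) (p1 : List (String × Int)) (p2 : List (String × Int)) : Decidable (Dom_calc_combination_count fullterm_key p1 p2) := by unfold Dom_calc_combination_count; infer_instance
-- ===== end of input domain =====

-- B replaces A's recursive pairwise sum-of-products (re-summing the tail at each step) by one
-- pass with a running prefix sum, fused with the filtering loop (objective: faster, O(n^2) → O(n)).

-- ===== PORT A =====
-- recursive_combination_prod(res, lst)
def recursive_combination_prod (res : Int) (lst : List Int) : Int :=
  match lst with
  | [] => res
  | x :: t => recursive_combination_prod (res + x * t.sum) t

def calc_combination_count (fullterm_key : String) (p1 : List (String × Int)) (p2 : List (String × Int)) : Int :=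
  -- fullterm_key[0] / fullterm_key[-1] are 1-char strings; represented as their char list
  let p1_key : List Char := ((PySem.Str.pyGet? fullterm_key 0).map (fun c => [c])).getD []
  let p2_key : List Char := ((PySem.Str.pyGet? fullterm_key (-1)).map (fun c => [c])).getD []
  let p1_vals := (PySem.Dict.ofList p1).items.foldl
    (fun acc kv => if kv.1.toList ≠ p1_key then acc ++ [kv.2] else acc) []
  let p2_vals := (PySem.Dict.ofList p2).items.foldl
    (fun acc kv => if kv.1.toList ≠ p2_key then acc ++ [kv.2] else acc) []
  recursive_combination_prod 0 p1_vals * recursive_combination_prod 0 p2_vals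

-- ===== PORT B =====
-- _half(d, key): one pass, running prefix sum
def pvHalf (items : List (String × Int)) (key : List Char) : Int :=
  (items.foldl
    (fun (p : Int × Int) kv => if kv.1.toList ≠ key then (p.1 + p.2 * kv.2, p.2 + kv.2) else p)
    (0, 0)).1

def calc_combination_count_alt (fullterm_key : String) (p1 : List (String × Int)) (p2 : List (String × Int)) : Int :=
  let k1 : List Char := ((PySem.Str.pyGet? fullterm_key 0).map (fun c => [c])).getD []
  let k2 : List Char := ((PySem.Str.pyGet? fullterm_key (-1)).map (fun c => [c])).getD []
  pvHalf (PySem.Dict.ofList p1).items k1 * pvHalf (PySem.Dict.ofList p2).items k2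

-- ===== PRECONDITION & SPEC =====
-- Pre_ excludes only the inputs where A raises: an empty fullterm_key (IndexError on fullterm_key[0]).
def Pre_calc_combination_count (fullterm_key : String) (p1 : List (String × Int)) (p2 : List (String × Int)) : Prop :=
  fullterm_key ≠ ""
instance (fullterm_key : String) (p1 : List (String × Int)) (p2 : List (String × Int)) : Decidable (Pre_calc_combination_count fullterm_key p1 p2) := by unfold Pre_calc_combination_count; infer_instance

def pvWitness_calc_combination_count : String × (List (String × Int)) × (List (String × Int)) :=
  ("ab", [("a", 2), ("x", 3), ("y", 4)], [("b", 5), ("z", 6)])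

def Spec_calc_combination_count (fullterm_key : String) (p1 : List (String × Int)) (p2 : List (String × Int)) (out : Int) : Prop := out = calc_combination_count_alt fullterm_key p1 p2
instance (fullterm_key : String) (p1 : List (String × Int)) (p2 : List (String × Int)) (out : Int) : Decidable (Spec_calc_combination_count fullterm_key p1 p2 out) := by unfold Spec_calc_combination_count; infer_instance

-- ===== CLAIM (what is proved, stated in full; the proofs are below) =====
def Claim_equal_calc_combination_count : Prop := ∀ (fullterm_key : String) (p1 : List (String × Int)) (p2 : List (String × Int)), Dom_calc_combination_count fullterm_key p1 p2 → Pre_calc_combination_count fullterm_key p1 p2 → Spec_calc_combination_count fullterm_key p1 p2 (calc_combination_count fullterm_key p1 p2)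

-- ===== LEMMAS AND PROOFS =====

-- pairwise sum of products, as A's recursion accumulates it
def pvPP : List Int → Int
  | [] => 0
  | x :: t => x * t.sum + pvPP t

theorem rcp_eq_pp (l : List Int) : ∀ res : Int, recursive_combination_prod res l = res + pvPP l := by
  induction l with
  | nil => intro res; simp [recursive_combination_prod, pvPP]
  | cons x t ih =>
    intro res
    simp only [recursive_combination_prod, pvPP, ih]
    ring

theorem fold_pair (l : List Int) : ∀ acc s : Int,
    l.foldl (fun (p : Int × Int) v => (p.1 + p.2 * v, p.2 + v)) (acc, s)
      = (acc + s * l.sum + pvPP l, s + l.sum) := by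
  induction l with
  | nil => intro acc s; simp [pvPP]
  | cons x t ih =>
    intro acc s
    simp only [List.foldl_cons, ih, pvPP, List.sum_cons, Prod.mk.injEq]
    constructor <;> ring

theorem half_eq_rcp (items : List (String × Int)) (key : List Char) :
    pvHalf items key
      = recursive_combination_prod 0
          (items.foldl (fun acc kv => if kv.1.toList ≠ key then acc ++ [kv.2] else acc) []) := by
  have hA := PySem.List.foldl_append_if
      (p := fun kv : String × Int => decide (kv.1.toList ≠ key))
      (f := fun kv : String × Int => kv.2) (l := items) (acc := ([] : List Int))
  simp only [decide_eq_true_eq] at hA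
  have hB : pvHalf items key
      = (((items.filter (fun kv : String × Int => decide (kv.1.toList ≠ key))).map
            (fun kv : String × Int => kv.2)).foldl
          (fun (p : Int × Int) v => (p.1 + p.2 * v, p.2 + v)) (0, 0)).1 := by
    unfold pvHalf
    rw [List.foldl_map, List.foldl_filter]
    simp only [decide_eq_true_eq]
  rw [hA, hB, fold_pair, rcp_eq_pp]
  simp

-- ===== VERDICT (by name: the statement is the Claim_ definition above) =====
theorem calc_combination_count_spec : Claim_equal_calc_combination_count := by
  intro fullterm_key p1 p2 _ _
  unfold Spec_calc_combination_count calc_combination_count calc_combination_count_alt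
  simp only [half_eq_rcp]
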